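-- pv_equiv track=rewrite | github.com/divyavenn/ghostpost | backend/backend/browser_automation/twitter/api.py | _convert_web_query_to_api
-- ===== SOURCE A (Python) =====
-- def _convert_web_query_to_api(query: str) -> str:
--     """
--     Convert Twitter web search operators to API v2 operators.
--
--     Web search (twitter.com) uses different operators than the API v2.
--
--     Web -> API conversions:
--     - -filter:replies -> -is:reply
--     - -filter:links -> -has:links
--     - -filter:retweets -> -is:retweet
--     - lang:en -> lang:en (same)
--     """
--     conversions = [
--         ("-filter:replies", "-is:reply"),
--         ("-filter:retweets", "-is:retweet"),
--         ("-filter:links", "-has:links"),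
--         ("filter:links", "has:links"),
--     ]
--
--     for web_op, api_op in conversions:
--         query = query.replace(web_op, api_op)
--
--     return query
-- ===== SOURCE B (Python) =====
-- def _convert_web_query_to_api(query: str) -> str:
--     """Single left-to-right pass: at each position try the operators in
--     priority order ('-filter:links' before 'filter:links'); first match wins."""
--     ops = [
--         ("-filter:replies", "-is:reply"),
--         ("-filter:retweets", "-is:retweet"),
--         ("-filter:links", "-has:links"),
--         ("filter:links", "has:links"),
--     ]
--     out = []
--     i = 0
--     n = len(query)
--     while i < n:
--         for web_op, api_op in ops:
--             if query.startswith(web_op, i):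
--                 out.append(api_op)
--                 i += len(web_op)
--                 break
--         else:
--             out.append(query[i])
--             i += 1
--     return "".join(out)
-- ===== Notes on version B (the rewrite author's own statement) =====
-- stated objective: alternative
-- what changed: A makes four sequential whole-string replace passes; B builds the result in one left-to-right scan that tries the four operators in priority order at each position (first match wins), proved to yield exactly the same string because no replacement text can start another operator match.
import Mathlib
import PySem

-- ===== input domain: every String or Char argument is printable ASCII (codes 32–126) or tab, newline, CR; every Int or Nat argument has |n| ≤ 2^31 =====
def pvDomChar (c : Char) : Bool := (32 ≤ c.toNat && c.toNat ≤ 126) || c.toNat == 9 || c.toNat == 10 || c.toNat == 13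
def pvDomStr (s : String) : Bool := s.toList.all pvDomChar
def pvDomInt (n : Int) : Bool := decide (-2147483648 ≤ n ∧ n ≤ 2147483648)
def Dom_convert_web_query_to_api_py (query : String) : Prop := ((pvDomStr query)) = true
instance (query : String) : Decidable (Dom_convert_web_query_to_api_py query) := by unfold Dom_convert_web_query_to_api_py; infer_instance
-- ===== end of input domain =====

-- B replaces A's four sequential whole-string replace passes by ONE left-to-right scan that
-- tries the four operators in priority order at each position (first match wins); objective:
-- alternative single-pass algorithm, proved to return exactly A's value on every string.

-- ===== PORT A =====
-- A: for (web_op, api_op) in conversions: query = query.replace(web_op, api_op)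
def convert_web_query_to_api_py (query : String) : String :=
  let conversions : List (String × String) :=
    [("-filter:replies", "-is:reply"), ("-filter:retweets", "-is:retweet"),
     ("-filter:links", "-has:links"), ("filter:links", "has:links")]
  conversions.foldl (fun q wa => PySem.Str.replace q wa.1 wa.2) query

-- ===== PORT B =====
-- the four (web_op, api_op) pairs of Source B's `ops`, as char lists (priority order)
def pvP1 : List Char := ['-','f','i','l','t','e','r',':','r','e','p','l','i','e','s']
def pvR1 : List Char := ['-','i','s',':','r','e','p','l','y']
def pvP2 : List Char := ['-','f','i','l','t','e','r',':','r','e','t','w','e','e','t','s']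
def pvR2 : List Char := ['-','i','s',':','r','e','t','w','e','e','t']
def pvP3 : List Char := ['-','f','i','l','t','e','r',':','l','i','n','k','s']
def pvR3 : List Char := ['-','h','a','s',':','l','i','n','k','s']
def pvP4 : List Char := ['f','i','l','t','e','r',':','l','i','n','k','s']
def pvR4 : List Char := ['h','a','s',':','l','i','n','k','s']

-- Source B's while loop: at each position try the ops in order (the inner `for`, unrolled over
-- the literal 4-element ops list), emit the api op and jump, or copy one char
def pvScan : List Char → List Char
  | [] => []
  | c :: t =>
    if pvP1.isPrefixOf (c :: t) then pvR1 ++ pvScan ((c :: t).drop pvP1.length)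
    else if pvP2.isPrefixOf (c :: t) then pvR2 ++ pvScan ((c :: t).drop pvP2.length)
    else if pvP3.isPrefixOf (c :: t) then pvR3 ++ pvScan ((c :: t).drop pvP3.length)
    else if pvP4.isPrefixOf (c :: t) then pvR4 ++ pvScan ((c :: t).drop pvP4.length)
    else c :: pvScan t
termination_by l => l.length
decreasing_by all_goals simp [pvP1, pvP2, pvP3, pvP4]

def convert_web_query_to_api_py_alt (query : String) : String :=
  String.ofList (pvScan query.toList)

-- ===== PRECONDITION & SPEC =====
def Spec_convert_web_query_to_api_py (query : String) (out : String) : Prop := out = convert_web_query_to_api_py_alt query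
instance (query : String) (out : String) : Decidable (Spec_convert_web_query_to_api_py query out) := by unfold Spec_convert_web_query_to_api_py; infer_instance

-- ===== CLAIM (what is proved, stated in full; the proofs are below) =====
def Claim_equal_convert_web_query_to_api_py : Prop := ∀ (query : String), Dom_convert_web_query_to_api_py query → Spec_convert_web_query_to_api_py query (convert_web_query_to_api_py query)

-- ===== LEMMAS AND PROOFS =====

-- str.replace old new (old ≠ ""), as the obvious structural recursion over the string
def pvRepl (old new : List Char) : List Char → List Char
  | [] => []
  | c :: t =>
    if h : old ≠ [] ∧ old.isPrefixOf (c :: t) then new ++ pvRepl old new ((c :: t).drop old.length)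
    else c :: pvRepl old new t
termination_by l => l.length
decreasing_by
  · have : old.length ≥ 1 := by cases old with | nil => exact absurd rfl h.1 | cons a b => simp
    simp [List.length_drop]; omega
  · simp

theorem pvGo_spec (old new : List Char) (h : old ≠ []) :
    ∀ fuel l acc, l.length ≤ fuel →
      PySem.Chars.replace.go old new fuel l acc = acc.reverse ++ pvRepl old new l := by
  intro fuel
  induction fuel with
  | zero => intro l acc hl
            have : l = [] := List.eq_nil_of_length_eq_zero (Nat.le_zero.mp hl)
            subst this; simp [PySem.Chars.replace.go, pvRepl]
  | succ n ih =>
    intro l acc hl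
    match l with
    | [] => simp [PySem.Chars.replace.go, pvRepl]
    | c :: t =>
      rw [PySem.Chars.replace.go]
      by_cases hp : old.isPrefixOf (c :: t)
      · simp only [hp, if_true]
        have hlen : old.length ≥ 1 := by cases old with | nil => exact absurd rfl h | cons a b => simp
        have hd : ((c :: t).drop old.length).length ≤ n := by
          rw [List.length_drop]; simp only [List.length_cons] at hl ⊢; omega
        rw [ih _ _ hd]
        rw [show pvRepl old new (c :: t) = new ++ pvRepl old new ((c :: t).drop old.length) from by
          rw [pvRepl]; simp [h, hp]]
        simp
      · simp only [hp, if_false]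
        rw [show pvRepl old new (c :: t) = c :: pvRepl old new t from by
          rw [pvRepl]; simp [hp]]
        rw [ih t (c :: acc) (by simp only [List.length_cons] at hl; omega)]
        simp

theorem pvChars_replace_eq (s old new : List Char) (h : old ≠ []) :
    PySem.Chars.replace s old new = pvRepl old new s := by
  rw [PySem.Chars.replace]
  simp [List.isEmpty_iff, h]
  exact pvGo_spec old new h s.length s [] (le_refl _)

-- `pvNoStart p R = true` ⇔ no occurrence of p can START inside R (even running past R's end):
-- at every offset of R, p mismatches R within R itself
def pvNoStart (p R : List Char) : Bool :=
  (List.range R.length).all (fun i => !(((R.drop i).zip p).all (fun ab => ab.1 == ab.2)))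

theorem pvZip_mismatch (p d : List Char)
    (h : ((d.zip p).all (fun ab => ab.1 == ab.2)) = false) :
    ∀ u, p.isPrefixOf (d ++ u) = false := by
  induction d generalizing p with
  | nil => simp at h
  | cons c d' ih =>
    intro u
    match p with
    | [] => simp at h
    | x :: p' =>
      simp only [List.zip_cons_cons, List.all_cons, Bool.and_eq_false_iff] at h
      simp only [List.cons_append, List.isPrefixOf]
      rcases h with h | h
      · have : (x == c) = false := by
          cases hxc : (x == c) <;> simp_all [BEq.comm]
        simp [this]
      · simp [ih p' h u]

theorem pvNoStart_not_prefix (p R : List Char) (h : pvNoStart p R = true) :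
    ∀ i, i < R.length → ∀ u, p.isPrefixOf (R.drop i ++ u) = false := by
  intro i hi u
  unfold pvNoStart at h
  rw [List.all_eq_true] at h
  have := h i (List.mem_range.mpr hi)
  simp only [Bool.not_eq_true'] at this
  exact pvZip_mismatch p (R.drop i) this u

theorem pvRepl_append (p r R : List Char) (h : pvNoStart p R = true) :
    ∀ u, pvRepl p r (R ++ u) = R ++ pvRepl p r u := by
  induction R with
  | nil => intro u; simp
  | cons c R' ih =>
    intro u
    have h0 : p.isPrefixOf (c :: (R' ++ u)) = false := by
      have := pvNoStart_not_prefix p (c :: R') h 0 (by simp) u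
      simpa using this
    rw [List.cons_append, pvRepl]
    simp only [h0, Bool.false_eq_true, and_false, dite_false]
    have h' : pvNoStart p R' = true := by
      unfold pvNoStart at h ⊢
      rw [List.all_eq_true] at h ⊢
      intro i hi
      have := h (i + 1) (by simp at hi ⊢; omega)
      simpa using this
    rw [ih h']; simp

theorem pvRepl_prefix (p r : List Char) (hp : p ≠ []) (u : List Char) :
    pvRepl p r (p ++ u) = r ++ pvRepl p r u := by
  match h : p ++ u with
  | [] => simp [List.append_eq_nil_iff] at h; exact absurd h.1 hp
  | c :: t =>
    rw [pvRepl]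
    have hpre : p.isPrefixOf (c :: t) = true := by
      rw [← h]; exact List.isPrefixOf_iff_prefix.mpr ⟨u, rfl⟩
    simp only [hp, hpre, and_true, ne_eq, not_false_iff, true_and, dite_true]
    rw [← h, List.drop_left]

-- the partial scans used only for the staged proof: scan with the first k ops only
def pvScan1 : List Char → List Char
  | [] => []
  | c :: t =>
    if pvP1.isPrefixOf (c :: t) then pvR1 ++ pvScan1 ((c :: t).drop pvP1.length)
    else c :: pvScan1 t
termination_by l => l.length
decreasing_by all_goals simp [pvP1]

def pvScan2 : List Char → List Char
  | [] => []
  | c :: t =>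
    if pvP1.isPrefixOf (c :: t) then pvR1 ++ pvScan2 ((c :: t).drop pvP1.length)
    else if pvP2.isPrefixOf (c :: t) then pvR2 ++ pvScan2 ((c :: t).drop pvP2.length)
    else c :: pvScan2 t
termination_by l => l.length
decreasing_by all_goals simp [pvP1, pvP2]

def pvScan3 : List Char → List Char
  | [] => []
  | c :: t =>
    if pvP1.isPrefixOf (c :: t) then pvR1 ++ pvScan3 ((c :: t).drop pvP1.length)
    else if pvP2.isPrefixOf (c :: t) then pvR2 ++ pvScan3 ((c :: t).drop pvP2.length)
    else if pvP3.isPrefixOf (c :: t) then pvR3 ++ pvScan3 ((c :: t).drop pvP3.length)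
    else c :: pvScan3 t
termination_by l => l.length
decreasing_by all_goals simp [pvP1, pvP2, pvP3]

-- stage 1: replace by the first op IS the one-op scan
theorem pvL1 : ∀ n s, List.length s ≤ n → pvRepl pvP1 pvR1 s = pvScan1 s := by
  intro n
  induction n with
  | zero => intro s hs; have : s = [] := List.eq_nil_of_length_eq_zero (Nat.le_zero.mp hs)
            subst this; rw [pvRepl, pvScan1]
  | succ n ih =>
    intro s hs
    match s with
    | [] => rw [pvRepl, pvScan1]
    | c :: t =>
      rw [pvRepl, pvScan1]
      by_cases hp : pvP1.isPrefixOf (c :: t)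
      · simp only [hp, if_true]
        have : pvP1 ≠ [] := by decide
        simp only [this, ne_eq, not_false_iff, true_and, hp, dite_true]
        rw [ih _ (by simp [pvP1, List.length_drop] at hs ⊢; omega)]
      · simp only [hp, if_false, Bool.false_eq_true, and_false, dite_false]
        rw [ih t (by simp only [List.length_cons] at hs; omega)]

theorem pvNoStart_tail (p : List Char) (c : Char) (R' : List Char)
    (h : pvNoStart p (c :: R') = true) : pvNoStart p R' = true := by
  unfold pvNoStart at h ⊢
  rw [List.all_eq_true] at h ⊢
  intro i hi
  have := h (i + 1) (by simp at hi ⊢; omega)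
  simpa using this

theorem pvScan1_append (R : List Char) (h1 : pvNoStart pvP1 R = true) :
    ∀ u, pvScan1 (R ++ u) = R ++ pvScan1 u := by
  induction R with
  | nil => intro u; simp
  | cons c R' ih =>
    intro u
    have e1 : pvP1.isPrefixOf (c :: (R' ++ u)) = false := by
      simpa using pvNoStart_not_prefix pvP1 (c :: R') h1 0 (by simp) u
    rw [List.cons_append, pvScan1]
    simp only [e1, if_false]
    rw [ih (pvNoStart_tail _ _ _ h1)]; simp

theorem pvScan2_append (R : List Char) (h1 : pvNoStart pvP1 R = true)
    (h2 : pvNoStart pvP2 R = true) :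
    ∀ u, pvScan2 (R ++ u) = R ++ pvScan2 u := by
  induction R with
  | nil => intro u; simp
  | cons c R' ih =>
    intro u
    have e1 : pvP1.isPrefixOf (c :: (R' ++ u)) = false := by
      simpa using pvNoStart_not_prefix pvP1 (c :: R') h1 0 (by simp) u
    have e2 : pvP2.isPrefixOf (c :: (R' ++ u)) = false := by
      simpa using pvNoStart_not_prefix pvP2 (c :: R') h2 0 (by simp) u
    rw [List.cons_append, pvScan2]
    simp only [e1, e2, if_false]
    rw [ih (pvNoStart_tail _ _ _ h1) (pvNoStart_tail _ _ _ h2)]; simp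

theorem pvScan3_append (R : List Char) (h1 : pvNoStart pvP1 R = true)
    (h2 : pvNoStart pvP2 R = true) (h3 : pvNoStart pvP3 R = true) :
    ∀ u, pvScan3 (R ++ u) = R ++ pvScan3 u := by
  induction R with
  | nil => intro u; simp
  | cons c R' ih =>
    intro u
    have e1 : pvP1.isPrefixOf (c :: (R' ++ u)) = false := by
      simpa using pvNoStart_not_prefix pvP1 (c :: R') h1 0 (by simp) u
    have e2 : pvP2.isPrefixOf (c :: (R' ++ u)) = false := by
      simpa using pvNoStart_not_prefix pvP2 (c :: R') h2 0 (by simp) u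
    have e3 : pvP3.isPrefixOf (c :: (R' ++ u)) = false := by
      simpa using pvNoStart_not_prefix pvP3 (c :: R') h3 0 (by simp) u
    rw [List.cons_append, pvScan3]
    simp only [e1, e2, e3, if_false]
    rw [ih (pvNoStart_tail _ _ _ h1) (pvNoStart_tail _ _ _ h2) (pvNoStart_tail _ _ _ h3)]; simp

theorem pvPrefix_cons (x : Char) (q : List Char) (c : Char) (X : List Char)
    (h : (x :: q).isPrefixOf (c :: X) = true) : c = x ∧ q.isPrefixOf X = true := by
  simp only [List.isPrefixOf, Bool.and_eq_true, beq_iff_eq] at h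
  exact ⟨h.1.symm, h.2⟩

theorem pvPrefix_cons_intro (x : Char) (q : List Char) (c : Char) (X : List Char)
    (hc : c = x) (h : q.isPrefixOf X = true) : (x :: q).isPrefixOf (c :: X) = true := by
  simp [List.isPrefixOf, hc, h]

theorem pvHead_of_prefix_append (x : Char) (q : List Char) (R X : List Char)
    (d : Char) (tl : List Char) (hR : R = d :: tl)
    (h : (x :: q).isPrefixOf (R ++ X) = true) : d = x := by
  subst hR
  exact (pvPrefix_cons x q d (tl ++ X) (by simpa using h)).1

theorem pvP2_cons : pvP2 = '-' :: pvP2.tail := rfl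
theorem pvP3_cons : pvP3 = '-' :: pvP3.tail := rfl
theorem pvP4_cons : pvP4 = 'f' :: pvP4.tail := rfl

-- a scan never CREATES a dash-free pattern: any dash-free prefix of the output is a prefix of the input
theorem pvNC1 : ∀ n t, List.length t ≤ n → ∀ (q : List Char), '-' ∉ q →
    q.isPrefixOf (pvScan1 t) = true → q.isPrefixOf t = true := by
  intro n
  induction n with
  | zero => intro t ht q hq hpre
            have : t = [] := List.eq_nil_of_length_eq_zero (Nat.le_zero.mp ht)
            subst this; simpa [pvScan1] using hpre
  | succ n ih =>
    intro t ht q hq hpre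
    match t with
    | [] => simp only [pvScan1] at hpre; exact hpre
    | c :: t' =>
      rw [pvScan1] at hpre
      by_cases h1 : pvP1.isPrefixOf (c :: t')
      · simp only [h1, if_true] at hpre
        match q with
        | [] => simp [List.isPrefixOf]
        | x :: q' =>
          exfalso
          have := pvHead_of_prefix_append x q' pvR1 _ '-' pvR1.tail rfl hpre
          exact hq (by simp [← this])
      · simp only [h1, Bool.false_eq_true, if_false] at hpre
        match q with
        | [] => simp [List.isPrefixOf]
        | x :: q' =>
          obtain ⟨hc, hq'⟩ := pvPrefix_cons x q' c _ hpre
          have := ih t' (by simp at ht; omega) q' (by simp at hq; exact hq.2) hq'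
          exact pvPrefix_cons_intro x q' c t' hc this

theorem pvNC2 : ∀ n t, List.length t ≤ n → ∀ (q : List Char), '-' ∉ q →
    q.isPrefixOf (pvScan2 t) = true → q.isPrefixOf t = true := by
  intro n
  induction n with
  | zero => intro t ht q hq hpre
            have : t = [] := List.eq_nil_of_length_eq_zero (Nat.le_zero.mp ht)
            subst this; simpa [pvScan2] using hpre
  | succ n ih =>
    intro t ht q hq hpre
    match t with
    | [] => simp only [pvScan2] at hpre; exact hpre
    | c :: t' =>
      rw [pvScan2] at hpre
      by_cases h1 : pvP1.isPrefixOf (c :: t')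
      · simp only [h1, if_true] at hpre
        match q with
        | [] => simp [List.isPrefixOf]
        | x :: q' =>
          exfalso
          have := pvHead_of_prefix_append x q' pvR1 _ '-' pvR1.tail rfl hpre
          exact hq (by simp [← this])
      · by_cases h2 : pvP2.isPrefixOf (c :: t')
        · simp only [h1, h2, if_true, Bool.false_eq_true, if_false] at hpre
          match q with
          | [] => simp [List.isPrefixOf]
          | x :: q' =>
            exfalso
            have := pvHead_of_prefix_append x q' pvR2 _ '-' pvR2.tail rfl hpre
            exact hq (by simp [← this])
        · simp only [h1, h2, Bool.false_eq_true, if_false] at hpre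
          match q with
          | [] => simp [List.isPrefixOf]
          | x :: q' =>
            obtain ⟨hc, hq'⟩ := pvPrefix_cons x q' c _ hpre
            have := ih t' (by simp at ht; omega) q' (by simp at hq; exact hq.2) hq'
            exact pvPrefix_cons_intro x q' c t' hc this

theorem pvNC3 : ∀ n t, List.length t ≤ n → ∀ (q : List Char), '-' ∉ q →
    q.isPrefixOf (pvScan3 t) = true → q.isPrefixOf t = true := by
  intro n
  induction n with
  | zero => intro t ht q hq hpre
            have : t = [] := List.eq_nil_of_length_eq_zero (Nat.le_zero.mp ht)
            subst this; simpa [pvScan3] using hpre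
  | succ n ih =>
    intro t ht q hq hpre
    match t with
    | [] => simp only [pvScan3] at hpre; exact hpre
    | c :: t' =>
      rw [pvScan3] at hpre
      by_cases h1 : pvP1.isPrefixOf (c :: t')
      · simp only [h1, if_true] at hpre
        match q with
        | [] => simp [List.isPrefixOf]
        | x :: q' =>
          exfalso
          have := pvHead_of_prefix_append x q' pvR1 _ '-' pvR1.tail rfl hpre
          exact hq (by simp [← this])
      · by_cases h2 : pvP2.isPrefixOf (c :: t')
        · simp only [h1, h2, if_true, Bool.false_eq_true, if_false] at hpre
          match q with
          | [] => simp [List.isPrefixOf]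
          | x :: q' =>
            exfalso
            have := pvHead_of_prefix_append x q' pvR2 _ '-' pvR2.tail rfl hpre
            exact hq (by simp [← this])
        · by_cases h3 : pvP3.isPrefixOf (c :: t')
          · simp only [h1, h2, h3, if_true, Bool.false_eq_true, if_false] at hpre
            match q with
            | [] => simp [List.isPrefixOf]
            | x :: q' =>
              exfalso
              have := pvHead_of_prefix_append x q' pvR3 _ '-' pvR3.tail rfl hpre
              exact hq (by simp [← this])
          · simp only [h1, h2, h3, Bool.false_eq_true, if_false] at hpre
            match q with
            | [] => simp [List.isPrefixOf]
            | x :: q' =>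
              obtain ⟨hc, hq'⟩ := pvPrefix_cons x q' c _ hpre
              have := ih t' (by simp at ht; omega) q' (by simp at hq; exact hq.2) hq'
              exact pvPrefix_cons_intro x q' c t' hc this

theorem pvLenDrop (c : Char) (t u P : List Char) (n : ℕ) (hu : c :: t = P ++ u)
    (hP : 1 ≤ P.length) (hs : (c :: t).length ≤ n + 1) : u.length ≤ n := by
  have := congrArg List.length hu
  simp at this hs ⊢
  omega

-- staged proof: adding the ops one at a time
theorem pvL2 : ∀ n s, List.length s ≤ n → pvRepl pvP2 pvR2 (pvScan1 s) = pvScan2 s := by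
  intro n
  induction n with
  | zero => intro s hs; have : s = [] := List.eq_nil_of_length_eq_zero (Nat.le_zero.mp hs)
            subst this; rw [pvScan1, pvScan2, pvRepl]
  | succ n ih =>
    intro s hs
    match s with
    | [] => rw [pvScan1, pvScan2, pvRepl]
    | c :: t =>
      rw [pvScan2]
      by_cases h1 : pvP1.isPrefixOf (c :: t)
      · simp only [h1, if_true, Bool.false_eq_true, if_false]
        rw [show pvScan1 (c :: t) = pvR1 ++ pvScan1 ((c :: t).drop pvP1.length) from by
          rw [pvScan1]; simp only [h1, if_true, Bool.false_eq_true, if_false]]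
        rw [pvRepl_append pvP2 pvR2 pvR1 (by decide)]
        obtain ⟨u, hu⟩ := List.isPrefixOf_iff_prefix.mp h1
        rw [show (c :: t).drop pvP1.length = u from by rw [← hu, List.drop_left]]
        rw [ih u (pvLenDrop c t u pvP1 n hu.symm (by decide) hs)]
      ·
        by_cases hk : pvP2.isPrefixOf (c :: t)
        · simp only [h1, hk, if_true, Bool.false_eq_true, if_false]
          obtain ⟨u, hu⟩ := List.isPrefixOf_iff_prefix.mp hk
          rw [show pvScan1 (c :: t) = pvP2 ++ pvScan1 u from by
            rw [← hu, pvScan1_append pvP2 (by decide)]]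
          rw [pvRepl_prefix pvP2 pvR2 (by decide)]
          rw [show (c :: t).drop pvP2.length = u from by rw [← hu, List.drop_left]]
          rw [ih u (pvLenDrop c t u pvP2 n hu.symm (by decide) hs)]
        · simp only [h1, hk, Bool.false_eq_true, if_false]
          rw [show pvScan1 (c :: t) = c :: pvScan1 t from by
            rw [pvScan1]; simp only [h1, Bool.false_eq_true, if_false]]
          have hnp : pvP2.isPrefixOf (c :: pvScan1 t) = false := by
            cases hfb : pvP2.isPrefixOf (c :: pvScan1 t) with
            | false => rfl
            | true =>
              exfalso
              rw [pvP2_cons] at hfb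
              obtain ⟨hc, hq⟩ := pvPrefix_cons _ pvP2.tail c _ hfb
              have hqt := pvNC1 t.length t le_rfl pvP2.tail (by decide) hq
              have hkx := pvPrefix_cons_intro _ pvP2.tail c t hc hqt
              rw [← pvP2_cons] at hkx
              exact hk hkx
          rw [show pvRepl pvP2 pvR2 (c :: pvScan1 t) = c :: pvRepl pvP2 pvR2 (pvScan1 t) from by
            rw [pvRepl]; simp [hnp]]
          rw [ih t (by simp at hs; omega)]

theorem pvL3 : ∀ n s, List.length s ≤ n → pvRepl pvP3 pvR3 (pvScan2 s) = pvScan3 s := by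
  intro n
  induction n with
  | zero => intro s hs; have : s = [] := List.eq_nil_of_length_eq_zero (Nat.le_zero.mp hs)
            subst this; rw [pvScan2, pvScan3, pvRepl]
  | succ n ih =>
    intro s hs
    match s with
    | [] => rw [pvScan2, pvScan3, pvRepl]
    | c :: t =>
      rw [pvScan3]
      by_cases h1 : pvP1.isPrefixOf (c :: t)
      · simp only [h1, if_true, Bool.false_eq_true, if_false]
        rw [show pvScan2 (c :: t) = pvR1 ++ pvScan2 ((c :: t).drop pvP1.length) from by
          rw [pvScan2]; simp only [h1, if_true, Bool.false_eq_true, if_false]]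
        rw [pvRepl_append pvP3 pvR3 pvR1 (by decide)]
        obtain ⟨u, hu⟩ := List.isPrefixOf_iff_prefix.mp h1
        rw [show (c :: t).drop pvP1.length = u from by rw [← hu, List.drop_left]]
        rw [ih u (pvLenDrop c t u pvP1 n hu.symm (by decide) hs)]
      ·
        by_cases h2 : pvP2.isPrefixOf (c :: t)
        · simp only [h1, h2, if_true, Bool.false_eq_true, if_false]
          rw [show pvScan2 (c :: t) = pvR2 ++ pvScan2 ((c :: t).drop pvP2.length) from by
            rw [pvScan2]; simp only [h1, h2, if_true, Bool.false_eq_true, if_false]]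
          rw [pvRepl_append pvP3 pvR3 pvR2 (by decide)]
          obtain ⟨u, hu⟩ := List.isPrefixOf_iff_prefix.mp h2
          rw [show (c :: t).drop pvP2.length = u from by rw [← hu, List.drop_left]]
          rw [ih u (pvLenDrop c t u pvP2 n hu.symm (by decide) hs)]
        ·
          by_cases hk : pvP3.isPrefixOf (c :: t)
          · simp only [h1, h2, hk, if_true, Bool.false_eq_true, if_false]
            obtain ⟨u, hu⟩ := List.isPrefixOf_iff_prefix.mp hk
            rw [show pvScan2 (c :: t) = pvP3 ++ pvScan2 u from by
              rw [← hu, pvScan2_append pvP3 (by decide) (by decide)]]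
            rw [pvRepl_prefix pvP3 pvR3 (by decide)]
            rw [show (c :: t).drop pvP3.length = u from by rw [← hu, List.drop_left]]
            rw [ih u (pvLenDrop c t u pvP3 n hu.symm (by decide) hs)]
          · simp only [h1, h2, hk, Bool.false_eq_true, if_false]
            rw [show pvScan2 (c :: t) = c :: pvScan2 t from by
              rw [pvScan2]; simp only [h1, h2, Bool.false_eq_true, if_false]]
            have hnp : pvP3.isPrefixOf (c :: pvScan2 t) = false := by
              cases hfb : pvP3.isPrefixOf (c :: pvScan2 t) with
              | false => rfl
              | true =>
                exfalso
                rw [pvP3_cons] at hfb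
                obtain ⟨hc, hq⟩ := pvPrefix_cons _ pvP3.tail c _ hfb
                have hqt := pvNC2 t.length t le_rfl pvP3.tail (by decide) hq
                have hkx := pvPrefix_cons_intro _ pvP3.tail c t hc hqt
                rw [← pvP3_cons] at hkx
                exact hk hkx
            rw [show pvRepl pvP3 pvR3 (c :: pvScan2 t) = c :: pvRepl pvP3 pvR3 (pvScan2 t) from by
              rw [pvRepl]; simp [hnp]]
            rw [ih t (by simp at hs; omega)]

theorem pvL4 : ∀ n s, List.length s ≤ n → pvRepl pvP4 pvR4 (pvScan3 s) = pvScan s := by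
  intro n
  induction n with
  | zero => intro s hs; have : s = [] := List.eq_nil_of_length_eq_zero (Nat.le_zero.mp hs)
            subst this; rw [pvScan3, pvScan, pvRepl]
  | succ n ih =>
    intro s hs
    match s with
    | [] => rw [pvScan3, pvScan, pvRepl]
    | c :: t =>
      rw [pvScan]
      by_cases h1 : pvP1.isPrefixOf (c :: t)
      · simp only [h1, if_true, Bool.false_eq_true, if_false]
        rw [show pvScan3 (c :: t) = pvR1 ++ pvScan3 ((c :: t).drop pvP1.length) from by
          rw [pvScan3]; simp only [h1, if_true, Bool.false_eq_true, if_false]]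
        rw [pvRepl_append pvP4 pvR4 pvR1 (by decide)]
        obtain ⟨u, hu⟩ := List.isPrefixOf_iff_prefix.mp h1
        rw [show (c :: t).drop pvP1.length = u from by rw [← hu, List.drop_left]]
        rw [ih u (pvLenDrop c t u pvP1 n hu.symm (by decide) hs)]
      ·
        by_cases h2 : pvP2.isPrefixOf (c :: t)
        · simp only [h1, h2, if_true, Bool.false_eq_true, if_false]
          rw [show pvScan3 (c :: t) = pvR2 ++ pvScan3 ((c :: t).drop pvP2.length) from by
            rw [pvScan3]; simp only [h1, h2, if_true, Bool.false_eq_true, if_false]]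
          rw [pvRepl_append pvP4 pvR4 pvR2 (by decide)]
          obtain ⟨u, hu⟩ := List.isPrefixOf_iff_prefix.mp h2
          rw [show (c :: t).drop pvP2.length = u from by rw [← hu, List.drop_left]]
          rw [ih u (pvLenDrop c t u pvP2 n hu.symm (by decide) hs)]
        ·
          by_cases h3 : pvP3.isPrefixOf (c :: t)
          · simp only [h1, h2, h3, if_true, Bool.false_eq_true, if_false]
            rw [show pvScan3 (c :: t) = pvR3 ++ pvScan3 ((c :: t).drop pvP3.length) from by
              rw [pvScan3]; simp only [h1, h2, h3, if_true, Bool.false_eq_true, if_false]]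
            rw [pvRepl_append pvP4 pvR4 pvR3 (by decide)]
            obtain ⟨u, hu⟩ := List.isPrefixOf_iff_prefix.mp h3
            rw [show (c :: t).drop pvP3.length = u from by rw [← hu, List.drop_left]]
            rw [ih u (pvLenDrop c t u pvP3 n hu.symm (by decide) hs)]
          ·
            by_cases hk : pvP4.isPrefixOf (c :: t)
            · simp only [h1, h2, h3, hk, if_true, Bool.false_eq_true, if_false]
              obtain ⟨u, hu⟩ := List.isPrefixOf_iff_prefix.mp hk
              rw [show pvScan3 (c :: t) = pvP4 ++ pvScan3 u from by
                rw [← hu, pvScan3_append pvP4 (by decide) (by decide) (by decide)]]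
              rw [pvRepl_prefix pvP4 pvR4 (by decide)]
              rw [show (c :: t).drop pvP4.length = u from by rw [← hu, List.drop_left]]
              rw [ih u (pvLenDrop c t u pvP4 n hu.symm (by decide) hs)]
            · simp only [h1, h2, h3, hk, Bool.false_eq_true, if_false]
              rw [show pvScan3 (c :: t) = c :: pvScan3 t from by
                rw [pvScan3]; simp only [h1, h2, h3, Bool.false_eq_true, if_false]]
              have hnp : pvP4.isPrefixOf (c :: pvScan3 t) = false := by
                cases hfb : pvP4.isPrefixOf (c :: pvScan3 t) with
                | false => rfl
                | true =>
                  exfalso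
                  rw [pvP4_cons] at hfb
                  obtain ⟨hc, hq⟩ := pvPrefix_cons _ pvP4.tail c _ hfb
                  have hqt := pvNC3 t.length t le_rfl pvP4.tail (by decide) hq
                  have hkx := pvPrefix_cons_intro _ pvP4.tail c t hc hqt
                  rw [← pvP4_cons] at hkx
                  exact hk hkx
              rw [show pvRepl pvP4 pvR4 (c :: pvScan3 t) = c :: pvRepl pvP4 pvR4 (pvScan3 t) from by
                rw [pvRepl]; simp [hnp]]
              rw [ih t (by simp at hs; omega)]

theorem pvStages (s : List Char) :
    pvRepl pvP4 pvR4 (pvRepl pvP3 pvR3 (pvRepl pvP2 pvR2 (pvRepl pvP1 pvR1 s))) = pvScan s := by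
  rw [pvL1 s.length s le_rfl, pvL2 s.length s le_rfl, pvL3 s.length s le_rfl,
      pvL4 s.length s le_rfl]

-- ===== VERDICT (by name: the statement is the Claim_ definition above) =====
theorem convert_web_query_to_api_py_spec : Claim_equal_convert_web_query_to_api_py := by
  intro query _
  unfold Spec_convert_web_query_to_api_py
  unfold convert_web_query_to_api_py convert_web_query_to_api_py_alt
  simp only [List.foldl, PySem.Str.replace, String.toList_ofList]
  congr 1
  rw [pvChars_replace_eq _ _ _ (by decide), pvChars_replace_eq _ _ _ (by decide),
      pvChars_replace_eq _ _ _ (by decide), pvChars_replace_eq _ _ _ (by decide)]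
  rw [show "-filter:replies".toList = pvP1 from by decide,
      show "-is:reply".toList = pvR1 from by decide,
      show "-filter:retweets".toList = pvP2 from by decide,
      show "-is:retweet".toList = pvR2 from by decide,
      show "-filter:links".toList = pvP3 from by decide,
      show "-has:links".toList = pvR3 from by decide,
      show "filter:links".toList = pvP4 from by decide,
      show "has:links".toList = pvR4 from by decide]
  exact pvStages query.toList
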